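-- pv_equiv track=rewrite | github.com/Kruta28866/BinPacking | main.py | full_enumeration
-- ===== SOURCE A (Python) =====
-- import argparse, random, copy, itertools, math
--
-- def full_enumeration(items, capacity, max_n=8):
--     if len(items) > max_n:
--         return None, None
--     n = len(items)
--     best_count = n + 1
--     best_sol = None
--     for assign in itertools.product(range(n), repeat=n):
--         bins = {}
--         valid = True
--         for i, b in enumerate(assign):
--             bins.setdefault(b, []).append(i)
--         for b in bins.values():
--             if sum(items[i] for i in b) > capacity:
--                 valid = False
--                 break
--         if not valid:
--             continue
--         used = len(bins)
--         if used < best_count: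
--             best_count = used
--             best_sol = [bins[k] for k in sorted(bins)]
--     return best_sol, best_count
-- ===== SOURCE B (Python) =====
-- def full_enumeration(items, capacity, max_n=8):
--     if len(items) > max_n:
--         return None, None
--     n = len(items)
--     best = [n + 1, None]
--
--     def rec(i, bins, sums):
--         if i == n:
--             if all(s <= capacity for s in sums) and len(bins) < best[0]:
--                 best[0] = len(bins)
--                 best[1] = [list(b) for b in bins]
--             return
--         for j in range(len(bins)):
--             bins[j].append(i)
--             sums[j] += items[i]
--             rec(i + 1, bins, sums)
--             bins[j].pop()
--             sums[j] -= items[i]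
--         bins.append([i])
--         sums.append(items[i])
--         rec(i + 1, bins, sums)
--         bins.pop()
--         sums.pop()
--
--     rec(0, [], [])
--     return best[1], best[0]
-- ===== Notes on version B (the rewrite author's own statement) =====
-- stated objective: faster
-- what changed: Instead of scanning all n^n label tuples (rebuilding a dict and re-checking sums for each), B does a DFS over set partitions (restricted-growth assignments), carrying the bins and their running sums incrementally, so only Bell(n) leaves are visited.
import Mathlib
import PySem

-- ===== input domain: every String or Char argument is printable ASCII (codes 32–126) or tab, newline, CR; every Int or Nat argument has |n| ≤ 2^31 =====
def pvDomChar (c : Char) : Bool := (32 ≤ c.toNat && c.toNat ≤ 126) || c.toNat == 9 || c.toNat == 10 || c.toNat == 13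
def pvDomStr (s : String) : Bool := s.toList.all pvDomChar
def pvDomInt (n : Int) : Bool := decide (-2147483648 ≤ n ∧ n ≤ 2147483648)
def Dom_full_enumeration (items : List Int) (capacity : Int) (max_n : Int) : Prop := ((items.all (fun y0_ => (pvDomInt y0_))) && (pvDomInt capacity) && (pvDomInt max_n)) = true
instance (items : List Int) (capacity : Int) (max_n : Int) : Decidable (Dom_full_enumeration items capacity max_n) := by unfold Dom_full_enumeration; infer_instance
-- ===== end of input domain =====

-- B replaces A's scan of all n^n label tuples (dict rebuilt per tuple) by a DFS over set
-- partitions (restricted-growth assignments) that carries the bins and their running sums.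

-- ===== PORT A =====
-- itertools.product(range(n), repeat=n) in lexicographic order
def pvTuples (vals : List Int) : Nat → List (List Int)
  | 0 => [[]]
  | Nat.succ k => vals.flatMap (fun v => (pvTuples vals k).map (fun t => v :: t))

-- sum(items[i] for i in b)
def pvSumItems (items : List Int) (bl : List Int) : Int :=
  bl.foldl (fun acc i => acc + PySem.List.pyGetD items i 0) 0

-- for i, b in enumerate(assign): bins.setdefault(b, []).append(i)
def pvBins (assign : List Int) : PySem.Dict Int (List Int) :=
  (PySem.List.enumerate assign).foldl (fun d p => d.modify p.2 [] (fun v => v ++ [p.1])) PySem.Dict.empty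

-- the body of A's outer loop (the 'for b in bins.values(): … break' computes a boolean: folded)
def pvStep (items : List Int) (capacity : Int) (st : Int × Option (List (List Int)))
    (assign : List Int) : Int × Option (List (List Int)) :=
  let bins := pvBins assign
  let valid := bins.values.foldl (fun ok bl => if pvSumItems items bl > capacity then false else ok) true
  if valid then
    let used : Int := (bins.size : Int)
    if used < st.1 then
      (used, some ((PySem.List.sorted bins.keys (fun k => k)).map (fun k => bins.getD k [])))
    else st
  else st

def full_enumeration (items : List Int) (capacity : Int) (max_n : Int) :
    Option (List (List Int)) × Option Int :=
  if PySem.List.len items > max_n then (none, none)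
  else
    let n := items.length
    let r := (pvTuples (PySem.List.pyRange 0 (n : Int)) n).foldl (pvStep items capacity) ((n : Int) + 1, none)
    (r.2, some r.1)

-- ===== PORT B =====
-- bins[j].append(x)
def pvAppendAt : List (List Int) → Nat → Int → List (List Int)
  | [], _, _ => []
  | b :: bs, 0, x => (b ++ [x]) :: bs
  | b :: bs, Nat.succ j, x => b :: pvAppendAt bs j x

-- sums[j] += x
def pvAddAt : List Int → Nat → Int → List Int
  | [], _, _ => []
  | s :: ss, 0, x => (s + x) :: ss
  | s :: ss, Nat.succ j, x => s :: pvAddAt ss j x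

-- rec(i, bins, sums) of Source B; the branch test 'i == n' is written 'i < n' (inverted) so the
-- recursion on n - i is structurally decreasing; on every reachable call i ≤ n, so it is the same test
def pvDfs (items : List Int) (capacity : Int) (n : Nat) (i : Nat) (bins : List (List Int))
    (sums : List Int) (best : Int × Option (List (List Int))) : Int × Option (List (List Int)) :=
  if h : i < n then
    let item := PySem.List.pyGetD items (i : Int) 0
    let b1 := (List.range bins.length).foldl
      (fun st j => pvDfs items capacity n (i + 1) (pvAppendAt bins j (i : Int)) (pvAddAt sums j item) st) best
    pvDfs items capacity n (i + 1) (bins ++ [[(i : Int)]]) (sums ++ [item]) b1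
  else
    if sums.all (fun s => s ≤ capacity) && decide ((bins.length : Int) < best.1) then
      ((bins.length : Int), some bins)
    else best
termination_by n - i
decreasing_by all_goals omega

def full_enumeration_alt (items : List Int) (capacity : Int) (max_n : Int) :
    Option (List (List Int)) × Option Int :=
  if PySem.List.len items > max_n then (none, none)
  else
    let n := items.length
    let r := pvDfs items capacity n 0 [] [] ((n : Int) + 1, none)
    (r.2, some r.1)

-- ===== PRECONDITION & SPEC =====
def Spec_full_enumeration (items : List Int) (capacity : Int) (max_n : Int) (out : Option (List (List Int)) × Option Int) : Prop := out = full_enumeration_alt items capacity max_n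
instance (items : List Int) (capacity : Int) (max_n : Int) (out : Option (List (List Int)) × Option Int) : Decidable (Spec_full_enumeration items capacity max_n out) := by unfold Spec_full_enumeration; infer_instance

-- ===== CLAIM (what is proved, stated in full; the proofs are below) =====
def Claim_equal_full_enumeration : Prop := ∀ (items : List Int) (capacity : Int) (max_n : Int), Dom_full_enumeration items capacity max_n → Spec_full_enumeration items capacity max_n (full_enumeration items capacity max_n)

-- ===== LEMMAS AND PROOFS =====

-- ---- proof-side abbreviations ----

-- A's loop body, factored as an optional candidate (used, sol) and a best-so-far step
def pvFA (items : List Int) (capacity : Int) (t : List Int) : Option (Int × List (List Int)) :=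
  if (pvBins t).values.foldl (fun ok bl => if pvSumItems items bl > capacity then false else ok) true then
    some (((pvBins t).size : Int),
      (PySem.List.sorted (pvBins t).keys (fun k => k)).map (fun k => (pvBins t).getD k []))
  else none

def pvBestStep (st : Int × Option (List (List Int))) (c : Int × List (List Int)) :
    Int × Option (List (List Int)) :=
  if c.1 < st.1 then (c.1, some c.2) else st

def pvFoldG (items : List Int) (capacity : Int) (st : Int × Option (List (List Int)))
    (L : List (List Int)) : Int × Option (List (List Int)) :=
  L.foldl (fun st t => match pvFA items capacity t with | none => st | some c => pvBestStep st c) st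

-- positions (as Python ints, starting at index i) where the label list s carries label b
def pvPosns (b : Int) : Int → List Int → List Int
  | _, [] => []
  | i, x :: s => if x = b then i :: pvPosns b (i + 1) s else pvPosns b (i + 1) s

-- restricted-growth check: with k bins open, each label is in 0..k, label k opens bin k
def pvGood (k : Nat) : List Int → Bool
  | [] => true
  | j :: s => (decide (0 ≤ j) && decide (j ≤ (k : Int))) && pvGood (if j = (k : Int) then k + 1 else k) s

-- final number of bins after a restricted-growth suffix
def pvKf (k : Nat) : List Int → Nat
  | [] => k
  | j :: s => pvKf (if j = (k : Int) then k + 1 else k) s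

-- all restricted-growth suffixes of length m with k bins open, in lexicographic order
def pvRgs (k : Nat) : Nat → List (List Int)
  | 0 => [[]]
  | Nat.succ m => (List.range (k + 1)).flatMap
      (fun j => (pvRgs (if j = k then k + 1 else k) m).map (fun s => ((j : Int)) :: s))

-- replay a label suffix on a bins list, starting at item index i (B's branching, sums dropped)
def pvApply : Nat → List (List Int) → List Int → List (List Int)
  | _, bins, [] => bins
  | i, bins, j :: s =>
    if j < (bins.length : Int) then pvApply (i + 1) (pvAppendAt bins j.toNat (i : Int)) s
    else pvApply (i + 1) (bins ++ [[(i : Int)]]) s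

-- B's leaf action on the bins a leaf has built
def pvLeaf (items : List Int) (capacity : Int) (st : Int × Option (List (List Int)))
    (bs : List (List Int)) : Int × Option (List (List Int)) :=
  if (bs.map (pvSumItems items)).all (fun s => s ≤ capacity) && decide ((bs.length : Int) < st.1) then
    ((bs.length : Int), some bs)
  else st

-- strict lexicographic order on equal-length Int lists (Python tuple <)
def pvLex : List Int → List Int → Bool
  | [], [] => false
  | [], _ :: _ => true
  | _ :: _, [] => false
  | x :: s, y :: u => decide (x < y) || (decide (x = y) && pvLex s u)

-- canonical (restricted-growth) relabeling: each label replaced by its first-occurrence rank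
def pvCanon (t : List Int) : List Int :=
  t.map (fun x => ((List.idxOf x (PySem.Set.ofList t) : Nat) : Int))

-- ---- basic lemmas ----

theorem pvLex_irrefl (t : List Int) : pvLex t t = false := by
  induction t with
  | nil => rfl
  | cons x s ih => simp [pvLex, ih]

theorem pvLex_asymm : ∀ s t : List Int, pvLex s t = true → pvLex t s = true → False := by
  intro s
  induction s with
  | nil => intro t h1 h2; cases t <;> simp [pvLex] at h1 h2
  | cons x s ih =>
    intro t h1 h2
    cases t with
    | nil => simp [pvLex] at h1
    | cons y u =>
      simp [pvLex] at h1 h2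
      rcases h1 with h1 | ⟨he1, h1⟩ <;> rcases h2 with h2 | ⟨he2, h2⟩ <;> try omega
      exact ih u h1 h2

theorem pvStep_eq (items : List Int) (capacity : Int) (st : Int × Option (List (List Int)))
    (t : List Int) :
    pvStep items capacity st t =
      (match pvFA items capacity t with | none => st | some c => pvBestStep st c) := by
  unfold pvStep pvFA pvBestStep
  split_ifs <;> simp_all

theorem pvTuples_mem (vals : List Int) :
    ∀ (m : Nat) (t : List Int), t ∈ pvTuples vals m ↔ t.length = m ∧ ∀ x ∈ t, x ∈ vals := by
  intro m
  induction m with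
  | zero =>
    intro t
    simp only [pvTuples, List.mem_singleton]
    constructor
    · rintro rfl; simp
    · rintro ⟨h, -⟩; exact List.length_eq_zero_iff.mp h
  | succ k ih =>
    intro t
    simp only [pvTuples, List.mem_flatMap, List.mem_map]
    constructor
    · rintro ⟨v, hv, s, hs, rfl⟩
      obtain ⟨hl, hall⟩ := (ih s).mp hs
      refine ⟨by simp [hl], ?_⟩
      intro x hx
      rcases List.mem_cons.mp hx with rfl | hx
      · exact hv
      · exact hall x hx
    · rintro ⟨hl, hall⟩
      cases t with
      | nil => simp at hl
      | cons x s =>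
        refine ⟨x, hall x (List.mem_cons_self), s, (ih s).mpr ⟨by simpa using hl, ?_⟩, rfl⟩
        intro y hy
        exact hall y (List.mem_cons_of_mem _ hy)


theorem pvPairwiseFlatMap {α β : Type} (R : β → β → Prop) (S : α → α → Prop)
    (g : α → List β) (l : List α) (hl : l.Pairwise S) (hin : ∀ a ∈ l, (g a).Pairwise R)
    (hcross : ∀ a b, S a b → ∀ x ∈ g a, ∀ y ∈ g b, R x y) : (l.flatMap g).Pairwise R := by
  induction l with
  | nil => simp
  | cons a l ih =>
    rw [List.flatMap_cons, List.pairwise_append]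
    refine ⟨hin a List.mem_cons_self,
      ih (List.pairwise_cons.mp hl).2 (fun b hb => hin b (List.mem_cons_of_mem _ hb)), ?_⟩
    intro x hx y hy
    obtain ⟨b, hb, hyb⟩ := List.mem_flatMap.mp hy
    exact hcross a b ((List.pairwise_cons.mp hl).1 b hb) x hx y hyb

theorem pvTuples_pairwise (vals : List Int) (hv : vals.Pairwise (· < ·)) :
    ∀ m : Nat, (pvTuples vals m).Pairwise (fun a b => pvLex a b = true) := by
  intro m
  induction m with
  | zero => simp [pvTuples]
  | succ k ih =>
    show (vals.flatMap _).Pairwise _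
    apply pvPairwiseFlatMap _ (· < ·) _ _ hv
    · intro a _
      exact List.Pairwise.map _ (fun s u hsu => by simp [pvLex, hsu]) ih
    · intro a b hab x hx y hy
      obtain ⟨s, _, rfl⟩ := List.mem_map.mp hx
      obtain ⟨u, _, rfl⟩ := List.mem_map.mp hy
      simp [pvLex, hab]

-- in a Pairwise-lex list, an element lex-smaller than t sits in the prefix before t
theorem mem_prefix_of_pairwise {L L1 L2 : List (List Int)} {t y : List Int}
    (hp : L.Pairwise (fun a b => pvLex a b = true)) (he : L = L1 ++ t :: L2)
    (hy : y ∈ L) (hlt : pvLex y t = true) : y ∈ L1 := by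
  subst he
  rcases List.mem_append.mp hy with h1 | h2
  · exact h1
  · rcases List.mem_cons.mp h2 with rfl | h3
    · rw [pvLex_irrefl] at hlt; cases hlt
    · exfalso
      have := (List.pairwise_append.mp hp).2.1
      have hty := (List.pairwise_cons.mp this).1 y h3
      exact pvLex_asymm y t hlt hty

-- ---- dict characterization ----

theorem pvBins_getD (t : List Int) (b : Int) : (pvBins t).getD b [] = pvPosns b 0 t := by
  have key : pvBins t = ((PySem.List.enumerate t).map Prod.swap).foldl
      (fun d p => d.modify p.1 [] (fun v => v ++ [p.2])) PySem.Dict.empty := by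
    rw [List.foldl_map]; rfl
  rw [key, PySem.Dict.getD_foldl_modify_append, PySem.Dict.getD_empty, List.nil_append]
  have aux : ∀ (s : List Int) (i : Int),
      (List.map (fun x => x.2) (List.filter (fun p => p.1 == b) (List.map Prod.swap (PySem.List.enumerate s i)))) = pvPosns b i s := by
    intro s
    induction s with
    | nil => intro i; simp [PySem.List.enumerate, pvPosns]
    | cons x s ih =>
      intro i
      rw [PySem.List.enumerate_cons]
      by_cases hx : x = b
      · simp [hx, pvPosns, ih]
      · simp [hx, pvPosns, ih]
  exact aux t 0

theorem pvBins_keys (t : List Int) : (pvBins t).keys = PySem.Set.ofList t := by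
  have key : pvBins t = ((PySem.List.enumerate t).map Prod.swap).foldl
      (fun d p => d.modify p.1 [] (fun v => v ++ [p.2])) PySem.Dict.empty := by
    rw [List.foldl_map]; rfl
  rw [key, PySem.Dict.keys_foldl_modify_key ((PySem.List.enumerate t).map Prod.swap) Prod.fst []
    (fun d p => (fun v => v ++ [p.2])) PySem.Dict.empty]
  rw [PySem.Dict.keys_empty, PySem.Set.update_nil_left, List.map_map]
  have : (Prod.fst ∘ Prod.swap : Int × Int → Int) = Prod.snd := by
    funext p; rfl
  rw [this]
  congr 1
  simp [pysem]

theorem pvBins_values (t : List Int) :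
    (pvBins t).values = (PySem.Set.ofList t).map (fun b => pvPosns b 0 t) := by
  have hnd : (pvBins t).keys.Nodup := by
    rw [pvBins_keys]; exact PySem.Set.nodup_ofList t
  have hv : (pvBins t).values = (pvBins t).items.map (fun p => p.2) := rfl
  rw [hv, PySem.Dict.items_eq_map_keys (pvBins t) hnd [], List.map_map, pvBins_keys]
  apply List.map_congr_left
  intro b _
  simp [pvBins_getD]

theorem pvBins_size (t : List Int) : (pvBins t).size = (PySem.Set.ofList t).length := by
  have hs : (pvBins t).size = (pvBins t).keys.length := by
    have : (pvBins t).keys = (pvBins t).items.map (fun p => p.1) := rfl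
    rw [this, List.length_map]; rfl
  rw [hs, pvBins_keys]

-- ---- canonical-relabeling lemmas ----

theorem pvRank_mem (t u s : List Int) (x : Int) (ht : t = u ++ s) (hx : x ∈ PySem.Set.ofList u) :
    List.idxOf x (PySem.Set.ofList t) = List.idxOf x (PySem.Set.ofList u) := by
  rw [ht, PySem.Set.ofList_append, PySem.Set.update_eq_append_filter, List.idxOf_append, if_pos hx]

theorem pvRank_new (t u : List Int) (x : Int) (s : List Int) (ht : t = u ++ x :: s)
    (hx : x ∉ PySem.Set.ofList u) :
    List.idxOf x (PySem.Set.ofList t) = (PySem.Set.ofList u).length := by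
  rw [ht, PySem.Set.ofList_append, PySem.Set.update_eq_append_filter, List.idxOf_append, if_neg hx]
  rw [PySem.Set.ofList_cons, List.filter_cons, if_pos (by simpa using hx)]
  rw [List.idxOf_cons_self]
  exact Nat.zero_add _

theorem pvRankInj (t : List Int) : ∀ x ∈ t, ∀ y ∈ t,
    ((List.idxOf x (PySem.Set.ofList t) : Nat) : Int) = ((List.idxOf y (PySem.Set.ofList t) : Nat) : Int) →
    x = y := by
  intro x hx y hy he
  have hx' := (PySem.Set.mem_ofList t x).mpr hx
  have hy' := (PySem.Set.mem_ofList t y).mpr hy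
  have he' : List.idxOf x (PySem.Set.ofList t) = List.idxOf y (PySem.Set.ofList t) := by
    exact_mod_cast he
  have h1 : (PySem.Set.ofList t)[List.idxOf x (PySem.Set.ofList t)]? = some x := by
    rw [List.getElem?_eq_getElem (List.idxOf_lt_length_iff.mpr hx'),
      List.getElem_idxOf (List.idxOf_lt_length_iff.mpr hx')]
  have h2 : (PySem.Set.ofList t)[List.idxOf y (PySem.Set.ofList t)]? = some y := by
    rw [List.getElem?_eq_getElem (List.idxOf_lt_length_iff.mpr hy'),
      List.getElem_idxOf (List.idxOf_lt_length_iff.mpr hy')]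
  rw [he'] at h1
  exact Option.some_inj.mp (h1.symm.trans h2)

theorem pvOfListMapInj (t : List Int) (g : Int → Int)
    (hg : ∀ x ∈ t, ∀ y ∈ t, g x = g y → x = y) :
    PySem.Set.ofList (t.map g) = (PySem.Set.ofList t).map g := by
  induction t using List.reverseRecOn with
  | nil => simp
  | append_singleton t x ih =>
    have hg' : ∀ a ∈ t, ∀ b ∈ t, g a = g b → a = b :=
      fun a ha b hb => hg a (by simp [ha]) b (by simp [hb])
    rw [List.map_append, List.map_singleton, PySem.Set.ofList_append_singleton,
      PySem.Set.ofList_append_singleton, ih hg']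
    by_cases hx : x ∈ PySem.Set.ofList t
    · rw [PySem.Set.add_of_mem hx, PySem.Set.add_of_mem (List.mem_map.mpr ⟨x, hx, rfl⟩)]
    · have hnm : g x ∉ (PySem.Set.ofList t).map g := by
        intro hm
        obtain ⟨y, hy, he⟩ := List.mem_map.mp hm
        have : y = x := hg y (by simp [(PySem.Set.mem_ofList t y).mp hy]) x (by simp) he
        exact hx (this ▸ hy)
      rw [PySem.Set.add_of_not_mem hx, PySem.Set.add_of_not_mem hnm, List.map_append,
        List.map_singleton]

theorem pvPosnsMapInj (g : Int → Int) (b : Int) :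
    ∀ (s : List Int) (i : Int), (∀ x ∈ s, (g x = g b ↔ x = b)) →
    pvPosns (g b) i (s.map g) = pvPosns b i s := by
  intro s
  induction s with
  | nil => intro i _; rfl
  | cons x s ih =>
    intro i hinj
    simp only [List.map_cons, pvPosns]
    have hiff := hinj x List.mem_cons_self
    have hrec := ih (i + 1) (fun y hy => hinj y (List.mem_cons_of_mem _ hy))
    by_cases hxb : x = b
    · rw [if_pos (hiff.mpr hxb), if_pos hxb, hrec]
    · rw [if_neg (fun h => hxb (hiff.mp h)), if_neg hxb, hrec]

theorem pvCanon_good_aux (t : List Int) : ∀ (s u : List Int), t = u ++ s →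
    pvGood (PySem.Set.ofList u).length
      (s.map (fun x => ((List.idxOf x (PySem.Set.ofList t) : Nat) : Int))) = true := by
  intro s
  induction s with
  | nil => intro u _; simp [pvGood]
  | cons x s ih =>
    intro u ht
    simp only [List.map_cons, pvGood, Bool.and_eq_true, decide_eq_true_eq]
    by_cases hx : x ∈ PySem.Set.ofList u
    · have hr : List.idxOf x (PySem.Set.ofList t) = List.idxOf x (PySem.Set.ofList u) :=
        pvRank_mem t u (x :: s) x ht hx
      have hlt : List.idxOf x (PySem.Set.ofList u) < (PySem.Set.ofList u).length :=
        List.idxOf_lt_length_iff.mpr hx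
      refine ⟨⟨Int.natCast_nonneg _, by exact_mod_cast (hr ▸ hlt.le)⟩, ?_⟩
      rw [if_neg (by exact_mod_cast (hr ▸ hlt.ne))]
      have hlen : (PySem.Set.ofList (u ++ [x])).length = (PySem.Set.ofList u).length := by
        rw [PySem.Set.ofList_append_singleton, PySem.Set.add_of_mem hx]
      have h2 := ih (u ++ [x]) (by rw [ht]; simp)
      rwa [hlen] at h2
    · have hr : List.idxOf x (PySem.Set.ofList t) = (PySem.Set.ofList u).length :=
        pvRank_new t u x s ht hx
      refine ⟨⟨Int.natCast_nonneg _, by exact_mod_cast hr.le⟩, ?_⟩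
      rw [if_pos (by exact_mod_cast hr)]
      have hlen : (PySem.Set.ofList (u ++ [x])).length = (PySem.Set.ofList u).length + 1 := by
        rw [PySem.Set.ofList_append_singleton, PySem.Set.add_of_not_mem hx]
        simp
      have h2 := ih (u ++ [x]) (by rw [ht]; simp)
      rwa [hlen] at h2

theorem pvFOu_range (t u s : List Int) (ht : t = u ++ s)
    (hpref : ∀ y ∈ u, ((List.idxOf y (PySem.Set.ofList t) : Nat) : Int) = y) :
    PySem.Set.ofList u = PySem.List.pyRange 0 ((PySem.Set.ofList u).length : Int) := by
  apply List.ext_getElem (by simp [PySem.List.length_pyRange_one])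
  intro p hp hp2
  have hmem : (PySem.Set.ofList u)[p] ∈ PySem.Set.ofList u := List.getElem_mem hp
  have hidx_u : List.idxOf ((PySem.Set.ofList u)[p]) (PySem.Set.ofList u) = p :=
    (PySem.Set.nodup_ofList u).idxOf_getElem p hp
  have hidx_t : List.idxOf ((PySem.Set.ofList u)[p]) (PySem.Set.ofList t) = p := by
    rw [pvRank_mem t u s _ ht hmem, hidx_u]
  have hfix := hpref _ ((PySem.Set.mem_ofList u _).mp hmem)
  rw [hidx_t] at hfix
  simp only [PySem.List.getElem_pyRange_one, zero_add]
  exact hfix.symm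

theorem pvCanon_lex_aux (t : List Int) (h0 : ∀ x ∈ t, 0 ≤ x) : ∀ (s u : List Int), t = u ++ s →
    (∀ y ∈ u, ((List.idxOf y (PySem.Set.ofList t) : Nat) : Int) = y) →
    (s.map (fun x => ((List.idxOf x (PySem.Set.ofList t) : Nat) : Int)) = s ∨
     pvLex (s.map (fun x => ((List.idxOf x (PySem.Set.ofList t) : Nat) : Int))) s = true) := by
  intro s
  induction s with
  | nil => intro u _ _; left; rfl
  | cons x s ih =>
    intro u ht hpref
    by_cases hx : x ∈ PySem.Set.ofList u
    · have hfix : ((List.idxOf x (PySem.Set.ofList t) : Nat) : Int) = x :=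
        hpref x ((PySem.Set.mem_ofList u x).mp hx)
      have hnext := ih (u ++ [x]) (by rw [ht]; simp) (by
        intro y hy
        rcases List.mem_append.mp hy with hy | hy
        · exact hpref y hy
        · have : y = x := List.mem_singleton.mp hy
          subst this
          exact hfix)
      rcases hnext with heq | hlex
      · left; simp only [List.map_cons, hfix, heq]
      · right; simp [pvLex, hfix, hlex]
    · have hr : List.idxOf x (PySem.Set.ofList t) = (PySem.Set.ofList u).length :=
        pvRank_new t u x s ht hx
      by_cases hxk : x = ((PySem.Set.ofList u).length : Int)
      · have hfix : ((List.idxOf x (PySem.Set.ofList t) : Nat) : Int) = x := by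
          rw [hr]; exact hxk.symm
        have hnext := ih (u ++ [x]) (by rw [ht]; simp) (by
          intro y hy
          rcases List.mem_append.mp hy with hy | hy
          · exact hpref y hy
          · have : y = x := List.mem_singleton.mp hy
            subst this
            exact hfix)
        rcases hnext with heq | hlex
        · left; simp only [List.map_cons, hfix, heq]
        · right; simp [pvLex, hfix, hlex]
      · right
        have hx0 : 0 ≤ x := h0 x (by rw [ht]; simp)
        have hxlt : ¬ x < ((PySem.Set.ofList u).length : Int) := by
          intro hlt
          apply hx
          rw [pvFOu_range t u (x :: s) ht hpref]
          exact PySem.List.mem_pyRange_one.mpr ⟨hx0, hlt⟩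
        have hgt : ((PySem.Set.ofList u).length : Int) < x := by omega
        simp [pvLex, hr, hgt]


theorem pvCanon_good (t : List Int) : pvGood 0 (pvCanon t) = true := by
  unfold pvCanon
  have h := pvCanon_good_aux t t [] (by simp)
  simpa using h

theorem pvCanon_lex (t : List Int) (h0 : ∀ x ∈ t, 0 ≤ x) :
    pvCanon t = t ∨ pvLex (pvCanon t) t = true := by
  unfold pvCanon
  have h := pvCanon_lex_aux t h0 t [] (by simp) (by intro y hy; simp at hy)
  exact h

theorem pvCanon_mem (n : Nat) (t : List Int) (ht : t ∈ pvTuples (PySem.List.pyRange 0 (n : Int)) n) :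
    pvCanon t ∈ pvTuples (PySem.List.pyRange 0 (n : Int)) n := by
  obtain ⟨hl, hall⟩ := (pvTuples_mem _ n t).mp ht
  refine (pvTuples_mem _ n _).mpr ⟨by simp [pvCanon, hl], ?_⟩
  intro x hx
  simp only [pvCanon, List.mem_map] at hx
  obtain ⟨y, hy, rfl⟩ := hx
  rw [PySem.List.mem_pyRange_one]
  refine ⟨Int.natCast_nonneg _, ?_⟩
  have h1 : List.idxOf y (PySem.Set.ofList t) < (PySem.Set.ofList t).length :=
    List.idxOf_lt_length_iff.mpr ((PySem.Set.mem_ofList t y).mpr hy)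
  have h2 : (PySem.Set.ofList t).length ≤ t.length := PySem.Set.length_ofList_le t
  exact_mod_cast lt_of_lt_of_le h1 (hl ▸ h2)

theorem pvCanon_values (t : List Int) : (pvBins (pvCanon t)).values = (pvBins t).values := by
  unfold pvCanon
  rw [pvBins_values, pvBins_values,
    pvOfListMapInj t _ (pvRankInj t), List.map_map]
  apply List.map_congr_left
  intro b hb
  have hbt : b ∈ t := (PySem.Set.mem_ofList t b).mp hb
  show pvPosns ((List.idxOf b (PySem.Set.ofList t) : Nat) : Int) 0
      (t.map (fun x => ((List.idxOf x (PySem.Set.ofList t) : Nat) : Int))) = pvPosns b 0 t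
  exact pvPosnsMapInj _ b t 0
    (fun x hx => ⟨fun h => pvRankInj t x hx b hbt h, fun h => by rw [h]⟩)

theorem pvCanon_size (t : List Int) : (pvBins (pvCanon t)).size = (pvBins t).size := by
  rw [pvBins_size, pvBins_size]
  unfold pvCanon
  rw [pvOfListMapInj t _ (pvRankInj t)]
  simp

-- ---- restricted-growth structure ----

theorem pvKf_ge : ∀ (s : List Int) (k : Nat), k ≤ pvKf k s := by
  intro s
  induction s with
  | nil => intro k; simp [pvKf]
  | cons j s ih =>
    intro k
    show k ≤ pvKf (if j = (k : Int) then k + 1 else k) s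
    split
    · exact le_trans (Nat.le_succ k) (ih (k + 1))
    · exact ih k

theorem pvFO_good : ∀ (s : List Int) (k : Nat), pvGood k s = true →
    PySem.Set.update (PySem.List.pyRange 0 (k : Int)) s = PySem.List.pyRange 0 (pvKf k s : Int) := by
  intro s
  induction s with
  | nil => intro k _; simp [pvKf, PySem.Set.update_nil]
  | cons j s ih =>
    intro k hg
    simp only [pvGood, Bool.and_eq_true, decide_eq_true_eq] at hg
    obtain ⟨⟨hj0, hjk⟩, hrest⟩ := hg
    rw [PySem.Set.update_cons]
    show PySem.Set.update (PySem.Set.add (PySem.List.pyRange 0 (k : Int)) j) s = _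
    by_cases hjk' : j = (k : Int)
    · subst hjk'
      have hnm : ((k : Nat) : Int) ∉ PySem.List.pyRange 0 (k : Int) := by
        rw [PySem.List.mem_pyRange_one]; omega
      rw [PySem.Set.add_of_not_mem hnm]
      have : (PySem.List.pyRange 0 (k : Int)) ++ [(k : Int)] = PySem.List.pyRange 0 ((k : Int) + 1) := by
        rw [PySem.List.pyRange_one_succ_right (by positivity)]
      rw [this]
      have h1 : ((k : Int) + 1) = (((k + 1 : Nat)) : Int) := by push_cast; ring
      rw [h1]
      have h2 : pvKf k (((k : Nat) : Int) :: s) = pvKf (k + 1) s := by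
        show pvKf (if ((k : Nat) : Int) = (k : Int) then k + 1 else k) s = _
        rw [if_pos rfl]
      rw [h2]
      exact ih (k + 1) (by rwa [if_pos rfl] at hrest)
    · have hm : j ∈ PySem.List.pyRange 0 (k : Int) := by
        rw [PySem.List.mem_pyRange_one]
        constructor
        · exact hj0
        · omega
      rw [PySem.Set.add_of_mem hm]
      have h2 : pvKf k (j :: s) = pvKf k s := by
        show pvKf (if j = (k : Int) then k + 1 else k) s = _
        rw [if_neg hjk']
      rw [h2]
      exact ih k (by rwa [if_neg hjk'] at hrest)


theorem pvFlatMapCongrMem {α β : Type} {l : List α} {f g : α → List β}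
    (h : ∀ a ∈ l, f a = g a) : l.flatMap f = l.flatMap g := by
  induction l with
  | nil => rfl
  | cons a l ih =>
    rw [List.flatMap_cons, List.flatMap_cons, h a List.mem_cons_self,
      ih (fun b hb => h b (List.mem_cons_of_mem _ hb))]

theorem pvGood_filter (n : Nat) : ∀ (m k : Nat), k + m ≤ n →
    (pvTuples (PySem.List.pyRange 0 (n : Int)) m).filter (pvGood k) = pvRgs k m := by
  intro m
  induction m with
  | zero =>
    intro k _
    simp [pvTuples, pvRgs, List.filter, pvGood]
  | succ m ih =>
    intro k hkm
    simp only [pvTuples]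
    rw [List.filter_flatMap]
    have inner : ∀ v : Int,
        List.filter (pvGood k) (List.map (fun t => v :: t) (pvTuples (PySem.List.pyRange 0 (n : Int)) m)) =
        if 0 ≤ v ∧ v ≤ (k : Int) then
          List.map (fun t => v :: t)
            (List.filter (pvGood (if v = (k : Int) then k + 1 else k)) (pvTuples (PySem.List.pyRange 0 (n : Int)) m))
        else [] := by
      intro v
      rw [List.filter_map]
      by_cases hv : 0 ≤ v ∧ v ≤ (k : Int)
      · rw [if_pos hv]
        congr 1
        apply List.filter_congr
        intro s _
        show pvGood k (v :: s) = _
        simp [pvGood, hv.1, hv.2]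
      · have hnil : List.filter (pvGood k ∘ fun t => v :: t) (pvTuples (PySem.List.pyRange 0 (n : Int)) m) = [] := by
          apply List.filter_eq_nil_iff.mpr
          intro s _
          show ¬ pvGood k (v :: s) = true
          simp only [pvGood, Bool.and_eq_true, decide_eq_true_eq]
          rintro ⟨⟨h1, h2⟩, -⟩
          exact hv ⟨h1, h2⟩
        rw [if_neg hv, hnil, List.map_nil]
    simp only [inner]
    set T := pvTuples (PySem.List.pyRange 0 (n : Int)) m with hT
    rw [PySem.List.pyRange_one_append 0 ((k : Int) + 1) (n : Int) (by positivity) (by omega)]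
    rw [List.flatMap_append]
    have h2 : (PySem.List.pyRange ((k : Int) + 1) (n : Int)).flatMap
        (fun v => if 0 ≤ v ∧ v ≤ (k : Int) then
          List.map (fun t => v :: t)
            (List.filter (pvGood (if v = (k : Int) then k + 1 else k)) T)
        else []) = [] := by
      apply List.flatMap_eq_nil_iff.mpr
      intro v hv
      rw [PySem.List.mem_pyRange_one] at hv
      rw [if_neg]
      rintro ⟨-, hle⟩
      omega
    rw [h2, List.append_nil]
    have h3 : ((k : Int) + 1) = (((k + 1 : Nat)) : Int) := by push_cast; ring
    rw [h3, PySem.List.pyRange_zero_nat, List.flatMap_map]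
    simp only [pvRgs]
    apply pvFlatMapCongrMem
    intro j hj
    have hjk : j < k + 1 := List.mem_range.mp hj
    rw [if_pos ⟨Int.natCast_nonneg _, by exact_mod_cast Nat.lt_succ_iff.mp hjk⟩]
    by_cases hje : j = k
    · rw [if_pos (by exact_mod_cast congrArg (Nat.cast : Nat → Int) hje), if_pos hje, hT,
        ih (k + 1) (by omega)]
    · rw [if_neg (by exact_mod_cast fun h => hje (Nat.cast_injective h)), if_neg hje, hT,
        ih k (by omega)]

-- ---- replaying an RGS suffix builds exactly the label-position blocks ----

theorem pvAppendAt_length : ∀ (bins : List (List Int)) (j : Nat) (x : Int),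
    (pvAppendAt bins j x).length = bins.length := by
  intro bins
  induction bins with
  | nil => intro j x; cases j <;> rfl
  | cons b bs ih =>
    intro j x
    cases j with
    | zero => rfl
    | succ j => simp [pvAppendAt, ih]

theorem pvAppendAt_getD : ∀ (bins : List (List Int)) (j : Nat) (x : Int) (p : Nat),
    j < bins.length →
    (pvAppendAt bins j x).getD p [] = if p = j then bins.getD p [] ++ [x] else bins.getD p [] := by
  intro bins
  induction bins with
  | nil => intro j x p h; simp at h
  | cons b bs ih =>
    intro j x p hj
    cases j with
    | zero =>
      cases p with
      | zero => simp [pvAppendAt]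
      | succ p => simp [pvAppendAt]
    | succ j =>
      cases p with
      | zero => simp [pvAppendAt]
      | succ p =>
        simp only [pvAppendAt, List.getD_cons_succ]
        rw [ih j x p (by simpa using hj)]
        by_cases hp : p = j <;> simp [hp]

theorem pvGetD_recon : ∀ (bins : List (List Int)),
    (List.range bins.length).map (fun j => bins.getD j []) = bins := by
  intro bins
  apply List.ext_getElem (by simp)
  intro p hp hp2
  simp only [List.getElem_map, List.getElem_range]
  rw [List.getD_eq_getElem?_getD, List.getElem?_eq_getElem hp2]
  rfl

theorem pvGetD_concat_length (l : List (List Int)) (a : List Int) :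
    (l ++ [a]).getD l.length [] = a := by
  rw [List.getD_eq_getElem?_getD, List.getElem?_concat_length]
  rfl

theorem pvSum_append (items : List Int) (bl : List Int) (x : Int) :
    pvSumItems items (bl ++ [x]) = pvSumItems items bl + PySem.List.pyGetD items x 0 := by
  unfold pvSumItems
  rw [List.foldl_append]
  rfl

theorem pvAddAt_map (items : List Int) : ∀ (bins : List (List Int)) (j : Nat) (x : Int),
    j < bins.length →
    pvAddAt (bins.map (pvSumItems items)) j (PySem.List.pyGetD items x 0) =
      (pvAppendAt bins j x).map (pvSumItems items) := by
  intro bins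
  induction bins with
  | nil => intro j x h; simp at h
  | cons b bs ih =>
    intro j x hj
    cases j with
    | zero => simp [pvAddAt, pvAppendAt, pvSum_append]
    | succ j =>
      simp only [List.map_cons, pvAddAt, pvAppendAt]
      rw [ih j x (by simpa using hj)]


theorem pvApply_spec : ∀ (s : List Int) (k : Nat) (bins : List (List Int)) (i : Nat),
    pvGood k s = true → bins.length = k →
    pvApply i bins s =
      (List.range k).map (fun j => bins.getD j [] ++ pvPosns ((j : Nat) : Int) (i : Int) s) ++
      (PySem.List.pyRange (k : Int) ((pvKf k s : Nat) : Int)).map (fun b => pvPosns b (i : Int) s) := by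
  intro s
  induction s with
  | nil =>
    intro k bins i _ hk
    subst hk
    show bins = _
    rw [show pvKf bins.length ([] : List Int) = bins.length from rfl]
    rw [PySem.List.pyRange_one_eq_nil (le_refl _), List.map_nil, List.append_nil]
    conv_lhs => rw [← pvGetD_recon bins]
    apply List.map_congr_left
    intro j _
    show bins.getD j [] = bins.getD j [] ++ pvPosns ((j : Nat) : Int) (i : Int) []
    simp [pvPosns]
  | cons j s ih =>
    intro k bins i hg hk
    simp only [pvGood, Bool.and_eq_true, decide_eq_true_eq] at hg
    obtain ⟨⟨hj0, hjk⟩, hrest⟩ := hg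
    by_cases hje : j = (k : Int)
    · -- new bin
      have hnotlt : ¬ j < (bins.length : Int) := by rw [hk]; omega
      have hstep1 : pvApply i bins (j :: s) = pvApply (i + 1) (bins ++ [[(i : Int)]]) s := by
        show (if j < (bins.length : Int) then pvApply (i + 1) (pvAppendAt bins j.toNat (i : Int)) s
          else pvApply (i + 1) (bins ++ [[(i : Int)]]) s) = _
        rw [if_neg hnotlt]
      rw [hstep1]
      rw [ih (k + 1) (bins ++ [[(i : Int)]]) (i + 1) (by rwa [if_pos hje] at hrest)
        (by simp [hk])]
      have hkf : pvKf k (j :: s) = pvKf (k + 1) s := by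
        show pvKf (if j = (k : Int) then k + 1 else k) s = _
        rw [if_pos hje]
      rw [hkf]
      have hklt : (k : Int) < ((pvKf (k + 1) s : Nat) : Int) := by
        have := pvKf_ge s (k + 1)
        exact_mod_cast Nat.lt_of_lt_of_le (Nat.lt_succ_self k) this
      rw [PySem.List.pyRange_one_cons hklt, List.range_succ, List.map_append, List.map_cons]
      rw [List.append_assoc]
      congr 1
      · -- old blocks
        apply List.map_congr_left
        intro p hp
        have hpk : p < k := List.mem_range.mp hp
        have hg1 : (bins ++ [[(i : Int)]]).getD p [] = bins.getD p [] :=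
          List.getD_append _ _ _ _ (hk ▸ hpk)
        have hg2 : pvPosns ((p : Nat) : Int) (i : Int) (j :: s) = pvPosns (p : Int) ((i : Int) + 1) s := by
          show (if j = (p : Int) then _ else _) = _
          rw [if_neg (by omega)]
        rw [hg1, hg2]
        push_cast
        rfl
      · -- the freshly opened block and the ones after it
        have hg3 : pvPosns ((k : Nat) : Int) (i : Int) (j :: s) = (i : Int) :: pvPosns (k : Int) ((i : Int) + 1) s := by
          show (if j = (k : Int) then _ else _) = _
          rw [if_pos hje]
        have hg4 : (bins ++ [[(i : Int)]]).getD k [] = [(i : Int)] := by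
          rw [← hk]; exact pvGetD_concat_length bins _
        simp only [List.map_cons, List.map_nil, List.nil_append]
        push_cast
        rw [hg4, hg3, List.singleton_append]
        congr 1
        apply List.map_congr_left
        intro b hb
        have hbk : (k : Int) + 1 ≤ b := (PySem.List.mem_pyRange_one.mp hb).1
        show _ = (if j = b then _ else _)
        rw [if_neg (by omega)]
    · -- existing bin
      have hlt : j < (bins.length : Int) := by rw [hk]; omega
      have hstep1 : pvApply i bins (j :: s) = pvApply (i + 1) (pvAppendAt bins j.toNat (i : Int)) s := by
        show (if j < (bins.length : Int) then pvApply (i + 1) (pvAppendAt bins j.toNat (i : Int)) s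
          else pvApply (i + 1) (bins ++ [[(i : Int)]]) s) = _
        rw [if_pos hlt]
      rw [hstep1]
      have hjn : j.toNat < k := by omega
      rw [ih k (pvAppendAt bins j.toNat (i : Int)) (i + 1) (by rwa [if_neg hje] at hrest)
        (by rw [pvAppendAt_length, hk])]
      have hkf : pvKf k (j :: s) = pvKf k s := by
        show pvKf (if j = (k : Int) then k + 1 else k) s = _
        rw [if_neg hje]
      rw [hkf]
      congr 1
      · apply List.map_congr_left
        intro p hp
        have hpk : p < k := List.mem_range.mp hp
        rw [pvAppendAt_getD bins j.toNat (i : Int) p (hk ▸ hjn)]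
        by_cases hpj : p = j.toNat
        · rw [if_pos hpj]
          have hg2 : pvPosns ((p : Nat) : Int) (i : Int) (j :: s) = (i : Int) :: pvPosns (p : Int) ((i : Int) + 1) s := by
            show (if j = (p : Int) then _ else _) = _
            rw [if_pos (by omega)]
          rw [hg2, List.append_assoc, List.singleton_append]
          push_cast
          rfl
        · rw [if_neg hpj]
          have hg2 : pvPosns ((p : Nat) : Int) (i : Int) (j :: s) = pvPosns (p : Int) ((i : Int) + 1) s := by
            show (if j = (p : Int) then _ else _) = _
            rw [if_neg (by omega)]
          rw [hg2]
          push_cast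
          rfl
      · apply List.map_congr_left
        intro b hb
        have hbk : ((k : Nat) : Int) ≤ b := (PySem.List.mem_pyRange_one.mp hb).1
        show _ = (if j = b then _ else _)
        rw [if_neg (by omega)]
        push_cast
        rfl

-- ---- the DFS is a fold of the leaf action over the RGS suffixes ----

theorem pvDfs_fold (items : List Int) (capacity : Int) (n : Nat) :
    ∀ (m i : Nat) (bins : List (List Int)) (sums : List Int) (best : Int × Option (List (List Int))),
    i + m = n → sums = bins.map (pvSumItems items) →
    pvDfs items capacity n i bins sums best =
      (pvRgs bins.length m).foldl (fun st s => pvLeaf items capacity st (pvApply i bins s)) best := by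
  intro m
  induction m with
  | zero =>
    intro i bins sums best hin hsums
    rw [pvDfs.eq_def, dif_neg (by omega)]
    show _ = pvLeaf items capacity best (pvApply i bins [])
    unfold pvLeaf
    rw [show pvApply i bins [] = bins from rfl, hsums]
  | succ m ih =>
    intro i bins sums best hin hsums
    rw [pvDfs.eq_def, dif_pos (by omega : i < n)]
    simp only [pvRgs]
    rw [List.foldl_flatMap]
    have hinner : ∀ (st : Int × Option (List (List Int))) (j : Nat),
        ((pvRgs (if j = bins.length then bins.length + 1 else bins.length) m).map
          (fun s => ((j : Int)) :: s)).foldl (fun st s => pvLeaf items capacity st (pvApply i bins s)) st =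
        (pvRgs (if j = bins.length then bins.length + 1 else bins.length) m).foldl
          (fun st s => pvLeaf items capacity st (pvApply i bins ((j : Int) :: s))) st := by
      intro st j
      rw [List.foldl_map]
    simp only [hinner]
    rw [List.range_succ, List.foldl_append]
    have hfirst : (List.range bins.length).foldl
        (fun st j => (pvRgs (if j = bins.length then bins.length + 1 else bins.length) m).foldl
          (fun st s => pvLeaf items capacity st (pvApply i bins ((j : Int) :: s))) st) best =
        (List.range bins.length).foldl
          (fun st j => pvDfs items capacity n (i + 1) (pvAppendAt bins j (i : Int))
            (pvAddAt sums j (PySem.List.pyGetD items (i : Int) 0)) st) best := by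
      apply PySem.List.foldl_congr_mem
      intro acc j hj
      have hjlt : j < bins.length := List.mem_range.mp hj
      rw [if_neg (by omega)]
      have happ : ∀ s : List Int, pvApply i bins ((j : Int) :: s) =
          pvApply (i + 1) (pvAppendAt bins j (i : Int)) s := by
        intro s
        show (if ((j : Nat) : Int) < (bins.length : Int) then _ else _) = _
        rw [if_pos (by exact_mod_cast hjlt)]
        rw [show ((j : Nat) : Int).toNat = j from Int.toNat_natCast j]
      simp only [happ]
      rw [ih (i + 1) (pvAppendAt bins j (i : Int))
        (pvAddAt sums j (PySem.List.pyGetD items (i : Int) 0)) acc (by omega)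
        (by rw [hsums, pvAddAt_map items bins j (i : Int) hjlt]), pvAppendAt_length]
    rw [hfirst]
    rw [List.foldl_cons, List.foldl_nil]
    have happ2 : ∀ s : List Int, pvApply i bins (((bins.length : Nat) : Int) :: s) =
        pvApply (i + 1) (bins ++ [[(i : Int)]]) s := by
      intro s
      show (if ((bins.length : Nat) : Int) < (bins.length : Int) then _ else _) = _
      rw [if_neg (by omega)]
    rw [if_pos rfl]
    simp only [happ2]
    rw [ih (i + 1) (bins ++ [[(i : Int)]]) (sums ++ [PySem.List.pyGetD items (i : Int) 0]) _
      (by omega) (by rw [hsums]; simp [pvSumItems])]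
    rw [show (bins ++ [[(i : Int)]]).length = bins.length + 1 from by simp]

-- ---- erasure: dominated elements may be filtered out of a best-so-far fold ----

theorem pvErase (items : List Int) (capacity : Int) (P : List Int → Bool) :
    ∀ (L : List (List Int)) (st : Int × Option (List (List Int))),
    (∀ L1 t L2, L = L1 ++ t :: L2 → P t = false → ∀ c, pvFA items capacity t = some c →
      st.1 ≤ c.1 ∨ ∃ y ∈ L1, ∃ cy, pvFA items capacity y = some cy ∧ cy.1 ≤ c.1) →
    pvFoldG items capacity st L = pvFoldG items capacity st (L.filter P) := by
  intro L
  induction L with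
  | nil => intro st _; rfl
  | cons h rest ih =>
    intro st hyp
    unfold pvFoldG
    simp only [List.foldl_cons, List.filter_cons]
    by_cases hP : P h = true
    · rw [if_pos hP]
      simp only [List.foldl_cons]
      set st' := (match pvFA items capacity h with | none => st | some c => pvBestStep st c) with hst'
      have hmono : st'.1 ≤ st.1 ∧ ∀ c, pvFA items capacity h = some c → st'.1 ≤ c.1 := by
        rw [hst']
        cases hfa : pvFA items capacity h with
        | none => simp
        | some c =>
          constructor
          · show (pvBestStep st c).1 ≤ st.1
            unfold pvBestStep; split_ifs <;> (try simp) <;> omega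
          · intro c' hc'
            rw [Option.some_inj] at hc'
            subst hc'
            show (pvBestStep st c).1 ≤ c.1
            unfold pvBestStep; split_ifs <;> (try simp) <;> omega
      have := ih st' ?_
      · exact this
      · intro L1 t L2 heq hPt c hfc
        rcases hyp (h :: L1) t L2 (by rw [heq]; rfl) hPt c hfc with hle | ⟨y, hy, cy, hfy, hcy⟩
        · exact Or.inl (le_trans hmono.1 hle)
        · rcases List.mem_cons.mp hy with rfl | hy'
          · exact Or.inl (le_trans (hmono.2 cy hfy) hcy)
          · exact Or.inr ⟨y, hy', cy, hfy, hcy⟩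
    · rw [if_neg hP]
      have hst : (match pvFA items capacity h with | none => st | some c => pvBestStep st c) = st := by
        cases hfa : pvFA items capacity h with
        | none => rfl
        | some c =>
          rcases hyp [] h rest rfl (by simpa using hP) c hfa with hle | ⟨y, hy, _⟩
          · show pvBestStep st c = st
            unfold pvBestStep
            rw [if_neg (by omega)]
          · simp at hy
      rw [hst]
      exact ih st (by
        intro L1 t L2 heq hPt c hfc
        rcases hyp (h :: L1) t L2 (by rw [heq]; rfl) hPt c hfc with hle | ⟨y, hy, cy, hfy, hcy⟩
        · exact Or.inl hle
        · rcases List.mem_cons.mp hy with rfl | hy'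
          · rcases hyp [] y (L1 ++ t :: L2) (by rw [heq]; rfl) (by simpa using hP) cy hfy with hle2 | ⟨z, hz, _⟩
            · exact Or.inl (le_trans hle2 hcy)
            · simp at hz
          · exact Or.inr ⟨y, hy', cy, hfy, hcy⟩)

-- ---- assembly ----


theorem pvValidFold (items : List Int) (capacity : Int) : ∀ (l : List (List Int)) (b : Bool),
    l.foldl (fun ok bl => if pvSumItems items bl > capacity then false else ok) b =
    (b && l.all (fun bl => decide (pvSumItems items bl ≤ capacity))) := by
  intro l
  induction l with
  | nil => intro b; simp
  | cons x l ih =>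
    intro b
    rw [List.foldl_cons, ih, List.all_cons]
    by_cases h : pvSumItems items x > capacity
    · rw [if_pos h]
      simp [show ¬ pvSumItems items x ≤ capacity from not_le.mpr h]
    · rw [if_neg h]
      simp [not_lt.mp h, Bool.and_assoc]

theorem pvCore (items : List Int) (capacity : Int) :
    (pvTuples (PySem.List.pyRange 0 (items.length : Int)) items.length).foldl
      (pvStep items capacity) ((items.length : Int) + 1, none) =
    pvDfs items capacity items.length 0 [] [] ((items.length : Int) + 1, none) := by
  classical
  have hstep : ∀ (st : Int × Option (List (List Int))) (L : List (List Int)),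
      L.foldl (pvStep items capacity) st = pvFoldG items capacity st L := by
    intro st L
    unfold pvFoldG
    exact PySem.List.foldl_congr_mem _ _ _ _ (fun acc x _ => pvStep_eq items capacity acc x)
  rw [hstep]
  -- step 2: drop all non-restricted-growth tuples (each is dominated by its canonical form)
  have hFAc : ∀ (t : List Int) (c : Int × List (List Int)), pvFA items capacity t = some c →
      ∃ cy, pvFA items capacity (pvCanon t) = some cy ∧ cy.1 = c.1 := by
    intro t c hfc
    unfold pvFA at hfc ⊢
    rw [pvCanon_values, pvCanon_size]
    by_cases hv : ((pvBins t).values.foldl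
        (fun ok bl => if pvSumItems items bl > capacity then false else ok) true) = true
    · rw [if_pos hv] at hfc
      rw [if_pos hv]
      obtain rfl := Option.some_inj.mp hfc
      exact ⟨_, rfl, rfl⟩
    · rw [if_neg hv] at hfc
      cases hfc
  have hpw := pvTuples_pairwise (PySem.List.pyRange 0 (items.length : Int))
    (PySem.List.pairwise_lt_pyRange_one 0 (items.length : Int)) items.length
  rw [pvErase items capacity (pvGood 0) _ _ ?hdom]
  case hdom =>
    intro L1 t L2 heq hPt c hfc
    right
    have htL : t ∈ pvTuples (PySem.List.pyRange 0 (items.length : Int)) items.length := by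
      rw [heq]; exact List.mem_append.mpr (Or.inr List.mem_cons_self)
    obtain ⟨hlen, hall⟩ := (pvTuples_mem _ items.length t).mp htL
    have h0 : ∀ x ∈ t, 0 ≤ x := fun x hx => (PySem.List.mem_pyRange_one.mp (hall x hx)).1
    have hne : pvCanon t ≠ t := by
      intro he
      have hgc := pvCanon_good t
      rw [he, hPt] at hgc
      cases hgc
    have hlex : pvLex (pvCanon t) t = true := (pvCanon_lex t h0).resolve_left hne
    obtain ⟨cy, hcy, hcy1⟩ := hFAc t c hfc
    exact ⟨pvCanon t, mem_prefix_of_pairwise hpw heq (pvCanon_mem items.length t htL) hlex,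
      cy, hcy, le_of_eq hcy1⟩
  -- step 3: the surviving tuples are exactly the RGS strings
  rw [pvGood_filter items.length items.length 0 (by omega)]
  -- step 4: on an RGS string, A's body equals B's leaf action
  have hleaf : ∀ (acc : Int × Option (List (List Int))), ∀ t ∈ pvRgs 0 items.length,
      (match pvFA items capacity t with | none => acc | some c => pvBestStep acc c) =
      pvLeaf items capacity acc (pvApply 0 [] t) := by
    intro acc t hmem
    have hg : pvGood 0 t = true := by
      rw [← pvGood_filter items.length items.length 0 (by omega)] at hmem
      exact List.of_mem_filter hmem
    have hFO : PySem.Set.ofList t = PySem.List.pyRange 0 ((pvKf 0 t : Nat) : Int) := by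
      have h2 := pvFO_good t 0 hg
      rw [show PySem.List.pyRange 0 ((0 : Nat) : Int) = [] from
        PySem.List.pyRange_one_eq_nil (by simp)] at h2
      rwa [PySem.Set.update_nil_left] at h2
    have happ : pvApply 0 [] t = (pvBins t).values := by
      rw [pvApply_spec t 0 [] 0 hg rfl, pvBins_values, hFO]
      simp
    have hsize : ((pvBins t).size : Int) = ((pvApply 0 [] t).length : Int) := by
      rw [pvBins_size, happ, pvBins_values, List.length_map]
    have hsol : (PySem.List.sorted (pvBins t).keys (fun k => k)).map (fun k => (pvBins t).getD k []) =
        pvApply 0 [] t := by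
      have hsorted : PySem.List.sorted (pvBins t).keys (fun k => k) = (pvBins t).keys := by
        rw [pvBins_keys, hFO]
        exact PySem.List.sorted_eq_of_perm_of_pairwise_lt _ _ _ (List.Perm.refl _)
          (PySem.List.pairwise_lt_pyRange_one _ _)
      rw [hsorted, happ, pvBins_values, pvBins_keys]
      apply List.map_congr_left
      intro b _
      rw [pvBins_getD]
    have hcond : ((pvBins t).values.foldl
        (fun ok bl => if pvSumItems items bl > capacity then false else ok) true) =
        ((pvApply 0 [] t).map (pvSumItems items)).all (fun s => s ≤ capacity) := by
      rw [pvValidFold, happ, List.all_map]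
      rfl
    unfold pvFA pvLeaf pvBestStep
    by_cases hv : ((pvBins t).values.foldl
        (fun ok bl => if pvSumItems items bl > capacity then false else ok) true) = true
    · rw [if_pos hv]
      have hA : ((pvApply 0 [] t).map (pvSumItems items)).all (fun s => decide (s ≤ capacity)) = true := by
        rw [← hcond]; exact hv
      rw [hA, hsize, hsol]
      simp only [Bool.true_and]
      by_cases hlt : ((pvApply 0 [] t).length : Int) < acc.1
      · rw [if_pos hlt, if_pos (by simpa using hlt)]
      · rw [if_neg hlt, if_neg (by simpa using hlt)]
    · rw [if_neg hv]
      have hA : ((pvApply 0 [] t).map (pvSumItems items)).all (fun s => decide (s ≤ capacity)) = false := by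
        rw [← hcond]; exact eq_false_of_ne_true hv
      rw [hA]
      simp
  unfold pvFoldG
  rw [PySem.List.foldl_congr_mem _ _ _ _ (fun acc x hx => hleaf acc x hx)]
  rw [pvDfs_fold items capacity items.length items.length 0 [] [] _ (by omega) (by simp)]
  rfl

-- ===== VERDICT (by name: the statement is the Claim_ definition above) =====
theorem full_enumeration_spec : Claim_equal_full_enumeration := by
  intro items capacity max_n _
  show _ = _
  unfold full_enumeration full_enumeration_alt
  by_cases h : PySem.List.len items > max_n
  · rw [if_pos h, if_pos h]
  · rw [if_neg h, if_neg h]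
    simp only [pvCore items capacity]
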